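-- pv_equiv track=rewrite | github.com/Rigotoni1/llms.txt | main.py | _sort_topics_by_relevance
-- ===== SOURCE A (Python) =====
-- def _sort_topics_by_relevance(topics):
--     """Sort topics by relevance (AI/fashion terms first)."""
--     high_priority = []
--     medium_priority = []
--     low_priority = []
--
--     for topic in topics:
--         topic_lower = topic.lower()
--         if any(term in topic_lower for term in ['ai', 'artificial intelligence', 'digital', 'virtual', 'generative']):
--             high_priority.append(topic)
--         elif any(term in topic_lower for term in ['fashion', 'model', 'photography', 'influencer', 'ecommerce']):
--             medium_priority.append(topic)
--         else:
--             low_priority.append(topic)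
--
--     return high_priority + medium_priority + low_priority
-- ===== SOURCE B (Python) =====
-- def _sort_topics_by_relevance(topics):
--     """Sort topics by relevance (AI/fashion terms first)."""
--     def rank(topic):
--         topic_lower = topic.lower()
--         if any(term in topic_lower for term in ['ai', 'artificial intelligence', 'digital', 'virtual', 'generative']):
--             return 0
--         if any(term in topic_lower for term in ['fashion', 'model', 'photography', 'influencer', 'ecommerce']):
--             return 1
--         return 2
--     return sorted(topics, key=rank)
-- ===== Notes on version B (the rewrite author's own statement) =====
-- stated objective: idiomatic
-- what changed: Replaces the three explicit priority buckets and their concatenation with a single stable sorted(topics, key=rank) call, where rank maps each topic to 0/1/2 by the same keyword tests.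
import Mathlib
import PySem

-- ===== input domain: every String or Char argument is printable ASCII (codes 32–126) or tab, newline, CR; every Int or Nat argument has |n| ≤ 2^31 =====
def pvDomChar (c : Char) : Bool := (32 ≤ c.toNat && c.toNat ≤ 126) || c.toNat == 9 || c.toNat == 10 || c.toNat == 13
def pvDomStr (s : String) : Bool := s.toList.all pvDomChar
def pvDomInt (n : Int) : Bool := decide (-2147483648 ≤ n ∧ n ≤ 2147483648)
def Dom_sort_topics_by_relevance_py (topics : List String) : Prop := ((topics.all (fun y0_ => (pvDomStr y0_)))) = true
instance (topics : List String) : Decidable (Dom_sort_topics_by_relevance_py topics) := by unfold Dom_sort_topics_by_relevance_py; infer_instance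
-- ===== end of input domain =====

-- B replaces A's three explicit priority buckets with a single stable sort by a 0/1/2 rank key (idiomatic).


-- ===== PORT A =====
-- literal transliteration: three buckets built in one pass, then concatenated
def sort_topics_by_relevance_py (topics : List String) : List String :=
  let r := topics.foldl
    (fun (acc : List String × List String × List String) topic =>
      let topic_lower := PySem.Str.lower topic
      if ["ai", "artificial intelligence", "digital", "virtual", "generative"].any
           (fun term => PySem.Str.isIn term topic_lower) then
        (acc.1 ++ [topic], acc.2.1, acc.2.2)
      else if ["fashion", "model", "photography", "influencer", "ecommerce"].any
           (fun term => PySem.Str.isIn term topic_lower) then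
        (acc.1, acc.2.1 ++ [topic], acc.2.2)
      else
        (acc.1, acc.2.1, acc.2.2 ++ [topic]))
    ([], [], [])
  r.1 ++ r.2.1 ++ r.2.2

-- ===== PORT B =====
-- helper: B's rank function (0 = high, 1 = medium, 2 = low)
def pvRank (topic : String) : Int :=
  let topic_lower := PySem.Str.lower topic
  if ["ai", "artificial intelligence", "digital", "virtual", "generative"].any
       (fun term => PySem.Str.isIn term topic_lower) then 0
  else if ["fashion", "model", "photography", "influencer", "ecommerce"].any
       (fun term => PySem.Str.isIn term topic_lower) then 1
  else 2

def sort_topics_by_relevance_py_alt (topics : List String) : List String :=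
  PySem.List.sorted topics pvRank false

-- ===== PRECONDITION & SPEC =====
def Spec_sort_topics_by_relevance_py (topics : List String) (out : List String) : Prop := out = sort_topics_by_relevance_py_alt topics
instance (topics : List String) (out : List String) : Decidable (Spec_sort_topics_by_relevance_py topics out) := by unfold Spec_sort_topics_by_relevance_py; infer_instance

-- ===== CLAIM (what is proved, stated in full; the proofs are below) =====
def Claim_equal_sort_topics_by_relevance_py : Prop := ∀ (topics : List String), Dom_sort_topics_by_relevance_py topics → Spec_sort_topics_by_relevance_py topics (sort_topics_by_relevance_py topics)

-- ===== LEMMAS AND PROOFS =====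

-- the two keyword tests, as Bool predicates (proof-side names for the inline conditions)
def pvHigh (t : String) : Bool :=
  ["ai", "artificial intelligence", "digital", "virtual", "generative"].any
    (fun term => PySem.Str.isIn term (PySem.Str.lower t))
def pvMed (t : String) : Bool :=
  ["fashion", "model", "photography", "influencer", "ecommerce"].any
    (fun term => PySem.Str.isIn term (PySem.Str.lower t))
def pvC1 (t : String) : Bool := !pvHigh t && pvMed t
def pvC2 (t : String) : Bool := !pvHigh t && !pvMed t

theorem pvRank_eq (t : String) :
    pvRank t = if pvHigh t then 0 else if pvMed t then 1 else 2 := by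
  simp [pvRank, pvHigh, pvMed]

theorem pvRank_high {t : String} (h : pvHigh t = true) : pvRank t = 0 := by
  simp [pvRank_eq, h]
theorem pvRank_c1 {t : String} (h : pvC1 t = true) : pvRank t = 1 := by
  simp [pvC1] at h
  simp [pvRank_eq, h.1, h.2]
theorem pvRank_c2 {t : String} (h : pvC2 t = true) : pvRank t = 2 := by
  simp [pvC2] at h
  simp [pvRank_eq, h.1, h.2]

-- A's loop invariant: the fold extends the three buckets with the three filters
theorem pvFoldA (xs : List String) (h m l : List String) :
    xs.foldl
      (fun (acc : List String × List String × List String) topic =>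
        let topic_lower := PySem.Str.lower topic
        if ["ai", "artificial intelligence", "digital", "virtual", "generative"].any
             (fun term => PySem.Str.isIn term topic_lower) then
          (acc.1 ++ [topic], acc.2.1, acc.2.2)
        else if ["fashion", "model", "photography", "influencer", "ecommerce"].any
             (fun term => PySem.Str.isIn term topic_lower) then
          (acc.1, acc.2.1 ++ [topic], acc.2.2)
        else
          (acc.1, acc.2.1, acc.2.2 ++ [topic]))
      (h, m, l)
    = (h ++ xs.filter pvHigh, m ++ xs.filter pvC1, l ++ xs.filter pvC2) := by
  induction xs generalizing h m l with
  | nil => simp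
  | cons x xs ih =>
    by_cases hh : pvHigh x = true
    · simp only [List.foldl_cons, List.filter_cons]
      rw [show (["ai", "artificial intelligence", "digital", "virtual", "generative"].any
             (fun term => PySem.Str.isIn term (PySem.Str.lower x))) = true from hh]
      simp only [ih, hh, pvC1, pvC2, Bool.not_true, Bool.false_and, if_true]
      simp
    · by_cases hm : pvMed x = true
      · simp only [List.foldl_cons, List.filter_cons]
        rw [show (["ai", "artificial intelligence", "digital", "virtual", "generative"].any
               (fun term => PySem.Str.isIn term (PySem.Str.lower x))) = false from by
            simpa [pvHigh] using hh]
        rw [show (["fashion", "model", "photography", "influencer", "ecommerce"].any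
               (fun term => PySem.Str.isIn term (PySem.Str.lower x))) = true from hm]
        simp only [Bool.false_eq_true, if_false, ih]
        have h1 : pvC1 x = true := by simp [pvC1, hm]; simpa using hh
        simp [hh, h1, pvC2, List.append_assoc]
        exact hm
      · simp only [List.foldl_cons, List.filter_cons]
        rw [show (["ai", "artificial intelligence", "digital", "virtual", "generative"].any
               (fun term => PySem.Str.isIn term (PySem.Str.lower x))) = false from by
            simpa [pvHigh] using hh]
        rw [show (["fashion", "model", "photography", "influencer", "ecommerce"].any
               (fun term => PySem.Str.isIn term (PySem.Str.lower x))) = false from by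
            simpa [pvMed] using hm]
        simp only [Bool.false_eq_true, if_false, ih]
        have h2 : pvC2 x = true := by
          simp [pvC2]
          exact ⟨by simpa using hh, by simpa using hm⟩
        simp [hh, h2, pvC1, List.append_assoc]
        simpa using hm

-- insertBy walks past a block it does not go before
theorem pvInsertBy_append (before : String → String → Bool) (x : String)
    (ys zs : List String) (hys : ∀ y ∈ ys, before x y = false) :
    PySem.List.insertBy before x (ys ++ zs) = ys ++ PySem.List.insertBy before x zs := by
  induction ys with
  | nil => simp
  | cons y ys ih =>
    have hy : before x y = false := hys y (by simp)
    simp only [List.cons_append, PySem.List.insertBy, hy, Bool.false_eq_true, if_false]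
    rw [ih (fun y hy => hys y (by simp [hy]))]

-- insertBy goes before every element of the block
theorem pvInsertBy_front (before : String → String → Bool) (x : String)
    (zs : List String) (hzs : ∀ z ∈ zs, before x z = true) :
    PySem.List.insertBy before x zs = x :: zs := by
  cases zs with
  | nil => rfl
  | cons z zs => simp [PySem.List.insertBy, hzs z (by simp)]

-- the stable sort by rank IS the three filters concatenated
theorem pvSorted_eq (xs : List String) :
    PySem.List.sorted xs pvRank false
      = xs.filter pvHigh ++ xs.filter pvC1 ++ xs.filter pvC2 := by
  induction xs using List.reverseRecOn with
  | nil => simp [PySem.List.sorted_eq_foldl_insertBy]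
  | append_singleton xs x ih =>
    rw [PySem.List.sorted_eq_foldl_insertBy, List.foldl_append,
        ← PySem.List.sorted_eq_foldl_insertBy, ih]
    simp only [List.foldl_cons, List.foldl_nil, List.filter_append, List.filter_cons,
      List.filter_nil]
    by_cases hh : pvHigh x = true
    · have h1 : pvC1 x = false := by simp [pvC1, hh]
      have h2 : pvC2 x = false := by simp [pvC2, hh]
      rw [List.append_assoc, pvInsertBy_append _ _ _ _ (fun y hy => by
        have : pvRank y = 0 := pvRank_high (List.mem_filter.mp hy).2
        simp [this, pvRank_high hh])]
      rw [pvInsertBy_front _ _ _ (fun z hz => by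
        rcases List.mem_append.mp hz with hz | hz
        · have : pvRank z = 1 := pvRank_c1 (List.mem_filter.mp hz).2
          simp [this, pvRank_high hh]
        · have : pvRank z = 2 := pvRank_c2 (List.mem_filter.mp hz).2
          simp [this, pvRank_high hh])]
      simp [hh, h1, h2, List.append_assoc]
    · by_cases hm : pvMed x = true
      · have h1 : pvC1 x = true := by simp [pvC1, hm]; simpa using hh
        have h2 : pvC2 x = false := by simp [pvC2, hm]
        rw [List.append_assoc, pvInsertBy_append _ _ _ _ (fun y hy => by
          have : pvRank y = 0 := pvRank_high (List.mem_filter.mp hy).2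
          simp [this, pvRank_c1 h1])]
        rw [pvInsertBy_append _ _ _ _ (fun y hy => by
          have : pvRank y = 1 := pvRank_c1 (List.mem_filter.mp hy).2
          simp [this, pvRank_c1 h1])]
        rw [pvInsertBy_front _ _ _ (fun z hz => by
          have : pvRank z = 2 := pvRank_c2 (List.mem_filter.mp hz).2
          simp [this, pvRank_c1 h1])]
        simp [hh, h1, h2, List.append_assoc]
      · have h1 : pvC1 x = false := by simp [pvC1, hm]
        have h2 : pvC2 x = true := by
          simp [pvC2]
          exact ⟨by simpa using hh, by simpa using hm⟩
        rw [List.append_assoc, pvInsertBy_append _ _ _ _ (fun y hy => by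
          have : pvRank y = 0 := pvRank_high (List.mem_filter.mp hy).2
          simp [this, pvRank_c2 h2])]
        rw [pvInsertBy_append _ _ _ _ (fun y hy => by
          have : pvRank y = 1 := pvRank_c1 (List.mem_filter.mp hy).2
          simp [this, pvRank_c2 h2])]
        rw [PySem.List.insertBy_of_forall_not_before _ _ _ (fun y hy => by
          have : pvRank y = 2 := pvRank_c2 (List.mem_filter.mp hy).2
          simp [this, pvRank_c2 h2])]
        simp [hh, h1, h2, List.append_assoc]

-- ===== VERDICT (by name: the statement is the Claim_ definition above) =====
theorem sort_topics_by_relevance_py_spec : Claim_equal_sort_topics_by_relevance_py := by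
  intro topics _
  unfold Spec_sort_topics_by_relevance_py sort_topics_by_relevance_py sort_topics_by_relevance_py_alt
  rw [pvSorted_eq, pvFoldA topics [] [] []]
  simp
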